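-- pv_equiv track=rewrite | github.com/nitishsalian-wq/VisaApp | qc/qc_engine.py | check_required_documents
-- ===== SOURCE A (Python) =====
-- def check_required_documents(visa_purpose, supporting_docs):
--     """Check that all required documents for the visa type are present."""
--     results = []
--     doc_types_present = set(d.get('_doc_type') for d in supporting_docs)
--
--     # Common requirements for all visa types
--     results.append({
--         'field': 'Required Doc: Covering Letter',
--         'status': 'pass' if 'covering_letter' in doc_types_present else 'fail',
--         'visa_value': 'Required',
--         'doc_value': 'Present' if 'covering_letter' in doc_types_present else 'MISSING',
--         'doc_source': 'Document Checklist',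
--         'message': 'Covering letter uploaded' if 'covering_letter' in doc_types_present else 'Covering letter is MISSING!'
--     })
--
--     # Business visa requirements
--     if visa_purpose == 'business':
--         results.append({
--             'field': 'Required Doc: Invitation Letter',
--             'status': 'pass' if 'invitation_letter' in doc_types_present else 'fail',
--             'visa_value': 'Required for Business',
--             'doc_value': 'Present' if 'invitation_letter' in doc_types_present else 'MISSING',
--             'doc_source': 'Document Checklist',
--             'message': 'Invitation letter uploaded' if 'invitation_letter' in doc_types_present else 'Invitation letter is REQUIRED for business visa!'
--         })
--
--     return results
-- ===== SOURCE B (Python) =====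
-- _REQS = {
--     'covering_letter': ('Required Doc: Covering Letter', 'Required',
--                         'Covering letter uploaded', 'Covering letter is MISSING!'),
--     'invitation_letter': ('Required Doc: Invitation Letter', 'Required for Business',
--                           'Invitation letter uploaded',
--                           'Invitation letter is REQUIRED for business visa!'),
-- }
--
--
-- def _entry(key, present):
--     field, visa_value, ok_msg, fail_msg = _REQS[key]
--     return {
--         'field': field,
--         'status': 'pass' if present else 'fail',
--         'visa_value': visa_value,
--         'doc_value': 'Present' if present else 'MISSING',
--         'doc_source': 'Document Checklist',
--         'message': ok_msg if present else fail_msg,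
--     }
--
--
-- def check_required_documents(visa_purpose, supporting_docs):
--     """Check that all required documents for the visa type are present."""
--     keys = ['covering_letter']
--     if visa_purpose == 'business':
--         keys.append('invitation_letter')
--
--     # Start pessimistic: every required doc marked missing; then upgrade
--     # entries in one scan over the uploads, stopping once nothing is pending.
--     results = [_entry(k, False) for k in keys]
--     pending = {k: i for i, k in enumerate(keys)}
--     for d in supporting_docs:
--         i = pending.pop(d.get('_doc_type'), None)
--         if i is not None:
--             results[i] = _entry(keys[i], True)
--         if not pending:
--             break
--     return results
-- ===== Notes on version B (the rewrite author's own statement) =====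
-- stated objective: alternative
-- what changed: Instead of first collecting the set of uploaded doc types and then constructing each result, B constructs all required results pre-marked as missing and then upgrades them in place during a single early-exiting scan over the uploads, driven by a pending key-to-index map.
import Mathlib
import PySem

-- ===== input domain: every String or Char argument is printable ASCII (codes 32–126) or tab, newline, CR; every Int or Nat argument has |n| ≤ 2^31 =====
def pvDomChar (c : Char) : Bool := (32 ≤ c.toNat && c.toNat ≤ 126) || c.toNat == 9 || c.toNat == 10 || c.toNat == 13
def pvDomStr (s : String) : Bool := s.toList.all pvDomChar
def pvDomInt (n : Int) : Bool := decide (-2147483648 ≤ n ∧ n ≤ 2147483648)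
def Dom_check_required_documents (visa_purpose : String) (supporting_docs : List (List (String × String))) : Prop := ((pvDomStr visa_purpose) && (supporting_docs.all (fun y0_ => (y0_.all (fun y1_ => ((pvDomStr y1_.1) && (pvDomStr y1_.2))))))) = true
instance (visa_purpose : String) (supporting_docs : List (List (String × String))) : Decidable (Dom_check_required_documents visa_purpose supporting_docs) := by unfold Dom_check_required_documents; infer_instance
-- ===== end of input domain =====

-- B builds the result list pessimistically (all requirements marked missing) and then upgrades
-- entries in a single early-exiting scan over the uploads driven by a pending-index map,
-- instead of A's "build presence set, then construct each entry"; objective: alternative.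

-- ===== PORT A =====
def check_required_documents (visa_purpose : String) (supporting_docs : List (List (String × String))) : List (List (String × String)) :=
  let doc_types_present : PySem.Set (Option String) :=
    PySem.Set.ofList (supporting_docs.map (fun d => (PySem.Dict.mk d).get? "_doc_type"))
  let results : List (List (String × String)) :=
    [[("field", "Required Doc: Covering Letter"),
      ("status", if doc_types_present.contains (some "covering_letter") then "pass" else "fail"),
      ("visa_value", "Required"),
      ("doc_value", if doc_types_present.contains (some "covering_letter") then "Present" else "MISSING"),
      ("doc_source", "Document Checklist"),
      ("message", if doc_types_present.contains (some "covering_letter") then "Covering letter uploaded" else "Covering letter is MISSING!")]]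
  if visa_purpose == "business" then
    results ++
      [[("field", "Required Doc: Invitation Letter"),
        ("status", if doc_types_present.contains (some "invitation_letter") then "pass" else "fail"),
        ("visa_value", "Required for Business"),
        ("doc_value", if doc_types_present.contains (some "invitation_letter") then "Present" else "MISSING"),
        ("doc_source", "Document Checklist"),
        ("message", if doc_types_present.contains (some "invitation_letter") then "Invitation letter uploaded" else "Invitation letter is REQUIRED for business visa!")]]
  else results

-- ===== PORT B =====
-- _REQS: key -> (field, visa_value, ok_msg, fail_msg); _REQS[key] is only evaluated on the
-- two keys present, so the total `getD` with a dummy default is exact on every reached input.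
def pvReqs : PySem.Dict String (String × String × String × String) :=
  PySem.Dict.mk
    [("covering_letter",
      ("Required Doc: Covering Letter", "Required",
       "Covering letter uploaded", "Covering letter is MISSING!")),
     ("invitation_letter",
      ("Required Doc: Invitation Letter", "Required for Business",
       "Invitation letter uploaded",
       "Invitation letter is REQUIRED for business visa!"))]

-- _entry(key, present)
def pvEntry (key : String) (present : Bool) : List (String × String) :=
  let r := pvReqs.getD key ("", "", "", "")
  [("field", r.1),
   ("status", if present then "pass" else "fail"),
   ("visa_value", r.2.1),
   ("doc_value", if present then "Present" else "MISSING"),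
   ("doc_source", "Document Checklist"),
   ("message", if present then r.2.2.1 else r.2.2.2)]

-- the `for d in supporting_docs: … break` loop, with (results, pending) as the loop state
def pvLoop (docs : List (List (String × String))) (keys : List String)
    (results : List (List (String × String))) (pending : PySem.Dict String Int) :
    List (List (String × String)) :=
  match docs with
  | [] => results
  | d :: rest =>
    -- i = pending.pop(d.get('_doc_type'), None)
    let t : Option String := (PySem.Dict.mk d).get? "_doc_type"
    let popd : Option Int × PySem.Dict String Int :=
      match t with
      | some s =>
        match pending.pop? s with
        | some (v, pending') => (some v, pending')
        | none => (none, pending)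
      | none => (none, pending)
    let results' :=
      match popd.1 with
      | some i => PySem.List.pySetD results i (pvEntry (PySem.List.pyGetD keys i "") true)
      | none => results
    if popd.2.size == 0 then results' else pvLoop rest keys results' popd.2

def check_required_documents_alt (visa_purpose : String) (supporting_docs : List (List (String × String))) : List (List (String × String)) :=
  let keys : List String :=
    if visa_purpose == "business" then ["covering_letter"] ++ ["invitation_letter"]
    else ["covering_letter"]
  let results := keys.map (fun k => pvEntry k false)
  let pending : PySem.Dict String Int :=
    (PySem.List.enumerate keys 0).foldl (fun d p => d.insert p.2 p.1) PySem.Dict.empty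
  pvLoop supporting_docs keys results pending

-- ===== PRECONDITION & SPEC =====
def Spec_check_required_documents (visa_purpose : String) (supporting_docs : List (List (String × String))) (out : List (List (String × String))) : Prop := out = check_required_documents_alt visa_purpose supporting_docs
instance (visa_purpose : String) (supporting_docs : List (List (String × String))) (out : List (List (String × String))) : Decidable (Spec_check_required_documents visa_purpose supporting_docs out) := by unfold Spec_check_required_documents; infer_instance

-- ===== CLAIM (what is proved, stated in full; the proofs are below) =====
def Claim_equal_check_required_documents : Prop := ∀ (visa_purpose : String) (supporting_docs : List (List (String × String))), Dom_check_required_documents visa_purpose supporting_docs → Spec_check_required_documents visa_purpose supporting_docs (check_required_documents visa_purpose supporting_docs)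

-- ===== LEMMAS AND PROOFS =====
def pvHas (docs : List (List (String × String))) (key : String) : Bool :=
  docs.any (fun d => (PySem.Dict.mk d).get? "_doc_type" == some key)

theorem pv_contains_eq_has (docs : List (List (String × String))) (key : String) :
    (PySem.Set.ofList (docs.map (fun d => (PySem.Dict.mk d).get? "_doc_type"))).contains (some key)
      = pvHas docs key := by
  rw [Bool.eq_iff_iff]
  simp [PySem.Set.mem_ofList, pvHas]

theorem pv_has_cons (d : List (String × String)) (rest : List (List (String × String))) (key : String) :
    pvHas (d :: rest) key
      = (((PySem.Dict.mk d).get? "_doc_type" == some key) || pvHas rest key) := by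
  simp [pvHas]

-- after covering_letter has been found: only invitation_letter is pending
theorem pv_loop_inv_only (docs : List (List (String × String))) (R : List (List (String × String))) :
    pvLoop docs ["covering_letter", "invitation_letter"] R (PySem.Dict.mk [("invitation_letter", (1 : Int))])
      = if pvHas docs "invitation_letter" then PySem.List.pySetD R 1 (pvEntry "invitation_letter" true) else R := by
  induction docs generalizing R with
  | nil => simp [pvLoop, pvHas]
  | cons d rest ih =>
    rw [pvLoop, pv_has_cons]
    cases ht : (PySem.Dict.mk d).get? "_doc_type" with
    | none => simpa using ih R
    | some s =>
      by_cases hs : s = "invitation_letter"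
      · subst hs
        simp [PySem.Dict.pop?, PySem.Dict.get?, PySem.Dict.erase, PySem.Dict.size,
          PySem.List.pySetD, PySem.List.pySet?, PySem.List.pyIdx?, PySem.List.pyGetD, PySem.List.pyGet?]
      · simpa [PySem.Dict.pop?, PySem.Dict.get?, PySem.Dict.erase, PySem.Dict.size,
          Ne.symm hs, hs] using ih R

-- after invitation_letter has been found: only covering_letter is pending
theorem pv_loop_cov_only (docs : List (List (String × String))) (R : List (List (String × String))) :
    pvLoop docs ["covering_letter", "invitation_letter"] R (PySem.Dict.mk [("covering_letter", (0 : Int))])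
      = if pvHas docs "covering_letter" then PySem.List.pySetD R 0 (pvEntry "covering_letter" true) else R := by
  induction docs generalizing R with
  | nil => simp [pvLoop, pvHas]
  | cons d rest ih =>
    rw [pvLoop, pv_has_cons]
    cases ht : (PySem.Dict.mk d).get? "_doc_type" with
    | none => simpa using ih R
    | some s =>
      by_cases hs : s = "covering_letter"
      · subst hs
        simp [PySem.Dict.pop?, PySem.Dict.get?, PySem.Dict.erase, PySem.Dict.size,
          PySem.List.pySetD, PySem.List.pySet?, PySem.List.pyIdx?, PySem.List.pyGetD, PySem.List.pyGet?]
      · simpa [PySem.Dict.pop?, PySem.Dict.get?, PySem.Dict.erase, PySem.Dict.size,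
          Ne.symm hs, hs] using ih R

-- both keys pending (the business-visa initial state)
theorem pv_loop_both (docs : List (List (String × String))) (R : List (List (String × String))) :
    pvLoop docs ["covering_letter", "invitation_letter"] R
        (PySem.Dict.mk [("covering_letter", (0 : Int)), ("invitation_letter", (1 : Int))])
      = (let R1 := if pvHas docs "covering_letter" then PySem.List.pySetD R 0 (pvEntry "covering_letter" true) else R
         if pvHas docs "invitation_letter" then PySem.List.pySetD R1 1 (pvEntry "invitation_letter" true) else R1) := by
  induction docs generalizing R with
  | nil => simp [pvLoop, pvHas]
  | cons d rest ih =>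
    rw [pvLoop]
    simp only [pv_has_cons]
    cases ht : (PySem.Dict.mk d).get? "_doc_type" with
    | none => simpa using ih R
    | some s =>
      by_cases hc : s = "covering_letter"
      · subst hc
        simp [PySem.Dict.pop?, PySem.Dict.get?, PySem.Dict.erase, PySem.Dict.size,
          pv_loop_inv_only, PySem.List.pyGetD, PySem.List.pyGet?, PySem.List.pyIdx?]
      · by_cases hi : s = "invitation_letter"
        · subst hi
          simp only [PySem.Dict.pop?, PySem.Dict.get?, PySem.Dict.erase, PySem.Dict.size]
          simp [pv_loop_cov_only, PySem.List.pyGetD, PySem.List.pyGet?, PySem.List.pyIdx?]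
          by_cases hcv : pvHas rest "covering_letter"
          · by_cases h1 : 1 < R.length
            · simp [hcv, h1, show 0 < R.length by omega, List.length_set,
                PySem.List.pySetD, PySem.List.pySet?, PySem.List.pyIdx?,
                List.set_comm _ _ (show (1:Nat) ≠ 0 by omega)]
            · by_cases h0 : 0 < R.length <;>
                simp [hcv, h1, h0, List.length_set,
                  PySem.List.pySetD, PySem.List.pySet?, PySem.List.pyIdx?]
          · simp [hcv, PySem.List.pySetD, PySem.List.pySet?, PySem.List.pyIdx?]
        · simpa [PySem.Dict.pop?, PySem.Dict.get?, PySem.Dict.erase, PySem.Dict.size,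
            Ne.symm hc, Ne.symm hi, hc, hi] using ih R

-- single pending key (non-business initial state)
theorem pv_loop_cov_single (docs : List (List (String × String))) (R : List (List (String × String))) :
    pvLoop docs ["covering_letter"] R (PySem.Dict.mk [("covering_letter", (0 : Int))])
      = if pvHas docs "covering_letter" then PySem.List.pySetD R 0 (pvEntry "covering_letter" true) else R := by
  induction docs generalizing R with
  | nil => simp [pvLoop, pvHas]
  | cons d rest ih =>
    rw [pvLoop, pv_has_cons]
    cases ht : (PySem.Dict.mk d).get? "_doc_type" with
    | none => simpa using ih R
    | some s =>
      by_cases hs : s = "covering_letter"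
      · subst hs
        simp [PySem.Dict.pop?, PySem.Dict.get?, PySem.Dict.erase, PySem.Dict.size,
          PySem.List.pySetD, PySem.List.pySet?, PySem.List.pyIdx?, PySem.List.pyGetD, PySem.List.pyGet?]
      · simpa [PySem.Dict.pop?, PySem.Dict.get?, PySem.Dict.erase, PySem.Dict.size,
          Ne.symm hs, hs] using ih R

-- the closed local state B builds in each branch, reduced to literals
theorem pv_alt_business (vp : String) (docs : List (List (String × String)))
    (h : (vp == "business") = true) :
    check_required_documents_alt vp docs
      = pvLoop docs ["covering_letter", "invitation_letter"]
          [pvEntry "covering_letter" false, pvEntry "invitation_letter" false]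
          (PySem.Dict.mk [("covering_letter", (0 : Int)), ("invitation_letter", (1 : Int))]) := by
  unfold check_required_documents_alt
  rw [h]
  rfl

theorem pv_alt_other (vp : String) (docs : List (List (String × String)))
    (h : (vp == "business") = false) :
    check_required_documents_alt vp docs
      = pvLoop docs ["covering_letter"] [pvEntry "covering_letter" false]
          (PySem.Dict.mk [("covering_letter", (0 : Int))]) := by
  unfold check_required_documents_alt
  rw [h]
  rfl

-- ===== VERDICT (by name: the statement is the Claim_ definition above) =====
theorem check_required_documents_spec : Claim_equal_check_required_documents := by
  intro vp docs _
  show check_required_documents vp docs = check_required_documents_alt vp docs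
  unfold check_required_documents
  simp only [pv_contains_eq_has]
  cases h : vp == "business"
  · rw [pv_alt_other vp docs h, pv_loop_cov_single]
    simp only [Bool.false_eq_true, if_false]
    by_cases hc : pvHas docs "covering_letter" <;>
      simp [hc, pvEntry, pvReqs, PySem.Dict.getD, PySem.Dict.get?,
        PySem.List.pySetD, PySem.List.pySet?, PySem.List.pyIdx?]
  · rw [pv_alt_business vp docs h, pv_loop_both]
    simp only [if_true]
    by_cases hc : pvHas docs "covering_letter" <;>
      by_cases hi : pvHas docs "invitation_letter" <;>
        simp [hc, hi, pvEntry, pvReqs, PySem.Dict.getD, PySem.Dict.get?,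
          PySem.List.pySetD, PySem.List.pySet?, PySem.List.pyIdx?]
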